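-- pv_equiv track=rewrite | github.com/anonfunc/talon-beta | formatting.py | sponge_format
-- ===== SOURCE A (Python) =====
-- def sponge_format(words: list) -> str:
--     dictation = " ".join(words)
--     result = []
--     caps = True
--     for c in dictation:
--         if c == " ":
--             result.append(c)
--             continue
--         result.append(c.upper() if caps else c.lower())
--         caps = not caps
--     return "".join(result)
-- ===== SOURCE B (Python) =====
-- def sponge_format(words: list) -> str:
--     s = " ".join(words)
--     cased = [c.upper() if i % 2 == 0 else c.lower()
--              for i, c in enumerate(ch for ch in s if ch != " ")]
--     out = []
--     j = 0
--     for c in s: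
--         if c == " ":
--             out.append(" ")
--         else:
--             out.append(cased[j])
--             j += 1
--     return "".join(out)
-- ===== Notes on version B (the rewrite author's own statement) =====
-- stated objective: alternative
-- what changed: B separates the two concerns A interleaves: it first cases the non-space characters by index parity in one comprehension, then reinserts them at the non-space positions of the joined string, instead of A's single flag-toggling loop.
import Mathlib
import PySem

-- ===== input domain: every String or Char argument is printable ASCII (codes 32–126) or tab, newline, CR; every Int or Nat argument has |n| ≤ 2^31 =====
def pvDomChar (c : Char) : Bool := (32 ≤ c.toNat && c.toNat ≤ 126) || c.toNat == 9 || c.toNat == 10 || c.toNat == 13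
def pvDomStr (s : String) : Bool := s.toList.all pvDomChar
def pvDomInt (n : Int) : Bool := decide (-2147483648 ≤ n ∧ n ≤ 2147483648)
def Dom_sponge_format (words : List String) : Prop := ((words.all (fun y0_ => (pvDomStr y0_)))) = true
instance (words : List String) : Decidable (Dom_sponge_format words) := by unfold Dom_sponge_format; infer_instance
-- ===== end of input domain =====

-- B separates casing (by index parity over the non-space characters) from space
-- preservation, replacing A's single flag-toggling loop; objective: alternative.

-- ===== PORT A =====
def sponge_format (words : List String) : String :=
  let dictation := PySem.Str.join " " words
  let st := dictation.toList.foldl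
    (fun (st : List Char × Bool) c =>
      if c = ' ' then (st.1 ++ [c], st.2)
      else (st.1 ++ [if st.2 then PySem.Chars.upperChar c else PySem.Chars.lowerChar c], !st.2))
    ([], true)
  String.mk st.1

-- ===== PORT B =====
def pvCase (i : Int) (c : Char) : Char :=
  if i % 2 = 0 then PySem.Chars.upperChar c else PySem.Chars.lowerChar c

-- the j-indexed reinsertion loop of Source B, with cased[j:] carried as the remaining list
def pvFill : List Char → List Char → List Char
  | [], _ => []
  | c :: cs, rem =>
    if c = ' ' then ' ' :: pvFill cs rem
    else match rem with
      | r :: rs => r :: pvFill cs rs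
      | [] => []   -- unreachable: cased has one entry per non-space character

def sponge_format_alt (words : List String) : String :=
  let s := (PySem.Str.join " " words).toList
  let cased := (PySem.List.enumerate (s.filter (fun c => c ≠ ' ')) 0).map
    (fun p => pvCase p.1 p.2)
  String.mk (pvFill s cased)

-- ===== PRECONDITION & SPEC =====
def Spec_sponge_format (words : List String) (out : String) : Prop := out = sponge_format_alt words
instance (words : List String) (out : String) : Decidable (Spec_sponge_format words out) := by unfold Spec_sponge_format; infer_instance

-- ===== CLAIM (what is proved, stated in full; the proofs are below) =====
def Claim_equal_sponge_format : Prop := ∀ (words : List String), Dom_sponge_format words → Spec_sponge_format words (sponge_format words)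

-- ===== LEMMAS AND PROOFS =====

-- direct-recursion form of A's loop
def spongeRec : List Char → Bool → List Char
  | [], _ => []
  | c :: cs, caps =>
    if c = ' ' then c :: spongeRec cs caps
    else (if caps then PySem.Chars.upperChar c else PySem.Chars.lowerChar c) :: spongeRec cs (!caps)

lemma foldlA_eq (l : List Char) (acc : List Char) (b : Bool) :
    (l.foldl
      (fun (st : List Char × Bool) c =>
        if c = ' ' then (st.1 ++ [c], st.2)
        else (st.1 ++ [if st.2 then PySem.Chars.upperChar c else PySem.Chars.lowerChar c], !st.2))
      (acc, b)).1 = acc ++ spongeRec l b := by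
  induction l generalizing acc b with
  | nil => simp [spongeRec]
  | cons c cs ih =>
    by_cases h : c = ' ' <;> simp [spongeRec, h, ih]

-- casing the non-space characters from a given parity
def casedFrom : Bool → List Char → List Char
  | _, [] => []
  | b, c :: cs =>
    (if b then PySem.Chars.upperChar c else PySem.Chars.lowerChar c) :: casedFrom (!b) cs

lemma map_enumerate_eq_casedFrom (ls : List Char) (i : Int) :
    (PySem.List.enumerate ls i).map (fun p => pvCase p.1 p.2)
      = casedFrom (i % 2 = 0) ls := by
  induction ls generalizing i with
  | nil => simp [PySem.List.enumerate_nil, casedFrom]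
  | cons c cs ih =>
    rw [PySem.List.enumerate_cons, List.map_cons, ih]
    have h2 : ((i + 1) % 2 = 0) ↔ ¬ (i % 2 = 0) := by omega
    by_cases h : i % 2 = 0 <;>
      simp [h, h2, casedFrom, pvCase]

lemma fill_casedFrom (s : List Char) (b : Bool) :
    pvFill s (casedFrom b (s.filter (fun c => !decide (c = ' ')))) = spongeRec s b := by
  induction s generalizing b with
  | nil => rfl
  | cons c cs ih =>
    by_cases h : c = ' '
    · subst h; simpa [pvFill, spongeRec, List.filter] using ih b
    · simpa [pvFill, spongeRec, List.filter, h, casedFrom] using ih (!b)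

-- ===== VERDICT (by name: the statement is the Claim_ definition above) =====
theorem sponge_format_spec : Claim_equal_sponge_format := by
  intro words _
  show _ = _
  unfold sponge_format sponge_format_alt
  simp only [foldlA_eq, map_enumerate_eq_casedFrom, List.nil_append]
  norm_num
  rw [fill_casedFrom]
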